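-- pv_equiv track=rewrite | github.com/codotronix/barick-leetcode | 2346-largest-3-same-digit-number-in-string/2346-largest-3-same-digit-number-in-string.py | largestGoodInteger
-- ===== SOURCE A (Python) =====
-- def largestGoodInteger(num: str) -> str:
--     mx = None
--     for i in range(2, len(num)):
--         if num[i] == num[i-1] == num[i-2]:
--             if mx is None:
--                 mx = num[i]
--             else:
--                 mx = max(mx, num[i])
--
--     return '' if mx is None else str(mx)*3
-- ===== SOURCE B (Python) =====
-- def largestGoodInteger(num: str) -> str:
--     for c in sorted(set(num), reverse=True):
--         if c * 3 in num:
--             return c * 3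
--     return ''
-- ===== Notes on version B (the rewrite author's own statement) =====
-- stated objective: simpler
-- what changed: Instead of A's single index scan over windows with a running None-aware max, B stages the work: collect the distinct characters, sort them in descending order, and return tripled the first one whose triple occurs as a substring (the 'c*3 in num' containment test replaces all window bookkeeping).
import Mathlib
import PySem

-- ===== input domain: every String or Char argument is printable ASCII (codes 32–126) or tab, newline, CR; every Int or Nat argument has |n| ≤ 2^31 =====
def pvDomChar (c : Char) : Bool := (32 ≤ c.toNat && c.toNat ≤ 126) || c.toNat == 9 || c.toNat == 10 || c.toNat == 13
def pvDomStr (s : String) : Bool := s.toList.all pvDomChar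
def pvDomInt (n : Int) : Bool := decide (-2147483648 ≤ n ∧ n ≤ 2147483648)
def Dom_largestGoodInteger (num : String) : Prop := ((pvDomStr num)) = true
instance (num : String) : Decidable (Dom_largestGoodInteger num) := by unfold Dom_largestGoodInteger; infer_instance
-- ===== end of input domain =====

-- B replaces A's running-max window scan by a staged computation: sort the distinct characters
-- descending and return tripled the first one whose triple is a substring ('c*3 in num').

-- ===== PORT A =====
-- A's loop body: at index i, if num[i] == num[i-1] == num[i-2], update mx (None-aware max).
-- Indices produced by range(2, len(num)) are always in range, so pyGetD's default is never used.
def pvAStep (s : List Char) (mx : Option Char) (i : Int) : Option Char :=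
  if PySem.List.pyGetD s i ' ' = PySem.List.pyGetD s (i-1) ' ' ∧
     PySem.List.pyGetD s (i-1) ' ' = PySem.List.pyGetD s (i-2) ' ' then
    match mx with
    | none => some (PySem.List.pyGetD s i ' ')
    | some m => some (max m (PySem.List.pyGetD s i ' '))
  else mx

def largestGoodInteger (num : String) : String :=
  match (PySem.List.pyRange 2 (PySem.Str.len num) 1).foldl (pvAStep num.toList) none with
  | none => ""
  | some m => String.ofList [m, m, m]   -- str(mx)*3

-- ===== PORT B =====
-- 'for c in cands: if c*3 in num: return c*3' then 'return ""' — B's early-return loop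
def pvFindFirst (cands : List Char) (s : List Char) : String :=
  match cands with
  | [] => ""
  | c :: rest => if PySem.Chars.isIn [c, c, c] s then String.ofList [c, c, c] else pvFindFirst rest s

-- sorted(set(num), reverse=True), then the loop above (sorted with no key over a set: order-independent)
def largestGoodInteger_alt (num : String) : String :=
  pvFindFirst (PySem.List.sorted (PySem.Set.ofList num.toList) (fun c => c) true) num.toList

-- ===== PRECONDITION & SPEC =====
def Spec_largestGoodInteger (num : String) (out : String) : Prop := out = largestGoodInteger_alt num
instance (num : String) (out : String) : Decidable (Spec_largestGoodInteger num out) := by unfold Spec_largestGoodInteger; infer_instance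

-- ===== CLAIM (what is proved, stated in full; the proofs are below) =====
def Claim_equal_largestGoodInteger : Prop := ∀ (num : String), Dom_largestGoodInteger num → Spec_largestGoodInteger num (largestGoodInteger num)

-- ===== LEMMAS AND PROOFS =====

-- A's accumulated value on a char list
def pvMxA (L : List Char) : Option Char :=
  (PySem.List.pyRange 2 (L.length : Int) 1).foldl (pvAStep L) none

-- the characters of the length-3 constant windows of L, in order
def pvWc : List Char → List Char
  | a :: b :: c :: t => (if a = b ∧ b = c then [a] else []) ++ pvWc (b :: c :: t)
  | _ => []

-- max of a list as an Option (none = empty list)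
def pvOmax (l : List Char) : Option Char :=
  match l with
  | [] => none
  | a :: t => some (t.foldl max a)

theorem pvWc_short (L : List Char) (h : L.length ≤ 2) : pvWc L = [] := by
  match L with
  | [] => rfl
  | [a] => rfl
  | [a, b] => rfl
  | a :: b :: c :: t => simp at h

theorem pvOmax_append (l : List Char) (x : Char) :
    pvOmax (l ++ [x]) = some (match pvOmax l with | none => x | some m => max m x) := by
  match l with
  | [] => rfl
  | a :: t => simp [pvOmax, List.foldl_append]

theorem pvMem_wc_iff (x : Char) (L : List Char) : x ∈ pvWc L ↔ [x, x, x] <:+: L := by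
  induction L using pvWc.induct with
  | case1 a b c t ih =>
    rw [pvWc]
    constructor
    · intro hx
      rcases List.mem_append.mp hx with h | h
      · have habc : a = b ∧ b = c := by by_contra hn; simp [hn] at h
        rw [if_pos habc] at h
        simp at h
        subst h
        exact (List.prefix_iff_eq_take.mpr (by simp [habc.1, habc.2, List.take])).isInfix
      · exact List.infix_cons (ih.mp h)
    · intro hinf
      rcases List.infix_cons_iff.mp hinf with hp | hi
      · obtain ⟨h1, hp⟩ := List.cons_prefix_cons.mp hp
        obtain ⟨h2, hp⟩ := List.cons_prefix_cons.mp hp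
        obtain ⟨h3, -⟩ := List.cons_prefix_cons.mp hp
        subst h1
        have hh : x = b ∧ b = c := ⟨h2, h2.symm.trans h3⟩
        simp [hh]
      · exact List.mem_append.mpr (Or.inr (ih.mpr hi))
  | case2 L h =>
    rcases L with _ | ⟨a, _ | ⟨b, _ | ⟨c, t⟩⟩⟩
    · simp [pvWc]
    · simp only [pvWc, List.not_mem_nil, false_iff]
      intro hinf; have := hinf.length_le; simp at this
    · simp only [pvWc, List.not_mem_nil, false_iff]
      intro hinf; have := hinf.length_le; simp at this
    · exact (h a b c t rfl).elim

theorem pvWc_append (M : List Char) (x : Char) :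
    pvWc (M ++ [x]) = pvWc M ++
      (if M.reverse[0]? = some x ∧ M.reverse[1]? = some x then [x] else []) := by
  induction M using pvWc.induct with
  | case1 a b c t ih =>
    have hstep : pvWc ((a :: b :: c :: t) ++ [x]) =
        (if a = b ∧ b = c then [a] else []) ++ pvWc ((b :: c :: t) ++ [x]) := by
      simp only [List.cons_append]
      rw [pvWc]
    rw [hstep, ih, pvWc]
    have hrev : (a :: b :: c :: t).reverse = (b :: c :: t).reverse ++ [a] := by simp
    have h0 : (a :: b :: c :: t).reverse[0]? = (b :: c :: t).reverse[0]? := by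
      rw [hrev, List.getElem?_append_left (by simp)]
    have h1 : (a :: b :: c :: t).reverse[1]? = (b :: c :: t).reverse[1]? := by
      rw [hrev, List.getElem?_append_left (by simp)]
    rw [h0, h1, List.append_assoc]
  | case2 M h =>
    rcases M with _ | ⟨a, _ | ⟨b, _ | ⟨c, t⟩⟩⟩
    · simp [pvWc]
    · simp [pvWc]
    · have h1 : pvWc ([a, b] ++ [x]) = (if a = b ∧ b = x then [a] else []) ++ pvWc [b, x] := by
        simp only [List.cons_append, List.nil_append]
        rw [pvWc]
      have h2 : pvWc [b, x] = [] := rfl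
      have h3 : pvWc [a, b] = [] := rfl
      rw [h1, h2, h3]
      simp only [List.reverse_cons, List.reverse_nil, List.nil_append, List.append_nil,
        List.singleton_append, List.getElem?_cons_zero, List.getElem?_cons_succ, Option.some.injEq]
      by_cases hab : a = b
      · subst hab
        by_cases hax : a = x
        · subst hax; simp
        · simp [hax]
      · rw [if_neg (fun hh => hab hh.1), if_neg (fun hh => hab (hh.2.trans hh.1.symm))]
    · exact (h a b c t rfl).elim

theorem pvGetD_append_left (M : List Char) (c : Char) (j : Int) (d : Char)
    (h0 : 0 ≤ j) (h1 : j < (M.length : Int)) :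
    PySem.List.pyGetD (M ++ [c]) j d = PySem.List.pyGetD M j d := by
  rw [PySem.List.pyGetD_eq_getElem _ d h0 (by simp; omega),
      PySem.List.pyGetD_eq_getElem _ d h0 (by simpa using h1)]
  exact List.getElem_append_left (by omega)
theorem pvAStep_append_congr (M : List Char) (c : Char) (mx : Option Char) (i : Int)
    (h2 : 2 ≤ i) (hi : i < (M.length : Int)) :
    pvAStep (M ++ [c]) mx i = pvAStep M mx i := by
  unfold pvAStep
  rw [pvGetD_append_left M c i ' ' (by omega) hi,
      pvGetD_append_left M c (i-1) ' ' (by omega) (by omega),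
      pvGetD_append_left M c (i-2) ' ' (by omega) (by omega)]
theorem pvMxA_eq_omax (L : List Char) : pvMxA L = pvOmax (pvWc L) := by
  induction L using List.reverseRecOn with
  | nil => rfl
  | append_singleton M x ih =>
    by_cases hM : 2 ≤ (M.length : Int)
    · have hmx : pvMxA (M ++ [x]) = pvAStep (M ++ [x]) (pvMxA M) (M.length : Int) := by
        unfold pvMxA
        have hlen : ((M ++ [x]).length : Int) = (M.length : Int) + 1 := by simp
        rw [hlen, PySem.List.pyRange_one_succ_right hM, List.foldl_append,
            List.foldl_cons, List.foldl_nil]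
        congr 1
        apply PySem.List.foldl_congr_mem
        intro mx i hi
        rw [PySem.List.mem_pyRange_one] at hi
        exact pvAStep_append_congr M x mx i hi.1 hi.2
      have hMl : 2 ≤ M.length := by exact_mod_cast hM
      have h0 : (0:Nat) < M.reverse.length := by simp; omega
      have h1 : (1:Nat) < M.reverse.length := by simp; omega
      have e0 : PySem.List.pyGetD (M ++ [x]) (M.length : Int) ' ' = x := by
        rw [PySem.List.pyGetD_eq_getElem _ ' ' (by positivity) (by simp)]
        simp
      have e1 : PySem.List.pyGetD (M ++ [x]) ((M.length : Int) - 1) ' ' = M.reverse[0]'h0 := by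
        rw [PySem.List.pyGetD_eq_getElem _ ' ' (by omega) (by simp only [List.length_append, List.length_cons, List.length_nil]; push_cast; omega)]
        rw [List.getElem_append_left (i := ((M.length : Int) - 1).toNat) (by omega),
            List.getElem_reverse]
        congr 1
        omega
      have e2 : PySem.List.pyGetD (M ++ [x]) ((M.length : Int) - 2) ' ' = M.reverse[1]'h1 := by
        rw [PySem.List.pyGetD_eq_getElem _ ' ' (by omega) (by simp only [List.length_append, List.length_cons, List.length_nil]; push_cast; omega)]
        rw [List.getElem_append_left (i := ((M.length : Int) - 2).toNat) (by omega),
            List.getElem_reverse]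
        congr 1
        omega
      rw [hmx, pvWc_append]
      by_cases hC : M.reverse[0]? = some x ∧ M.reverse[1]? = some x
      · have hr0 : M.reverse[0]'h0 = x := by
          have := hC.1; rwa [List.getElem?_eq_getElem h0, Option.some.injEq] at this
        have hr1 : M.reverse[1]'h1 = x := by
          have := hC.2; rwa [List.getElem?_eq_getElem h1, Option.some.injEq] at this
        rw [if_pos hC, pvOmax_append, ← ih]
        unfold pvAStep
        rw [e0, e1, e2, hr0, hr1, if_pos ⟨rfl, rfl⟩]
        rcases pvMxA M with _ | m <;> rfl
      · rw [if_neg hC, List.append_nil, ← ih]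
        unfold pvAStep
        rw [e0, e1, e2, if_neg]
        rintro ⟨ha, hb⟩
        exact hC ⟨by rw [List.getElem?_eq_getElem h0, ← ha],
                  by rw [List.getElem?_eq_getElem h1, ← hb, ← ha]⟩
    · have hr : pvMxA (M ++ [x]) = none := by
        unfold pvMxA
        rw [PySem.List.pyRange_one_eq_nil (by simp; omega)]
        rfl
      rw [hr, pvWc_short (M ++ [x]) (by simp; omega)]
      rfl

theorem pvFindFirst_spec (D s : List Char) (hD : D.Pairwise (fun a b => b < a))
    (hcov : ∀ c, c ∈ pvWc s → c ∈ D) :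
    pvFindFirst D s =
      match pvOmax (pvWc s) with
      | none => ""
      | some m => String.ofList [m, m, m] := by
  induction D with
  | nil =>
    have hwc : pvWc s = [] := by
      rw [List.eq_nil_iff_forall_not_mem]
      intro c hc
      exact absurd (hcov c hc) (List.not_mem_nil)
    rw [pvFindFirst, hwc]
    rfl
  | cons d rest ih =>
    obtain ⟨hd, hrest⟩ := List.pairwise_cons.mp hD
    rw [pvFindFirst]
    by_cases hP : PySem.Chars.isIn [d, d, d] s = true
    · rw [if_pos hP]
      have hdmem : d ∈ pvWc s := (pvMem_wc_iff d s).mpr ((PySem.Chars.isIn_iff_infix _ _).mp hP)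
      rcases hwc : pvWc s with _ | ⟨a, t⟩
      · rw [hwc] at hdmem; exact absurd hdmem (List.not_mem_nil)
      · have hdm : d ∈ a :: t := hwc ▸ hdmem
        have hmax := PySem.List.le_foldl_max t a
        have hdle : d ≤ t.foldl max a := by
          rcases List.mem_cons.mp hdm with h | h
          · exact h ▸ hmax.1
          · exact hmax.2 d h
        have hmmem : t.foldl max a ∈ pvWc s := by
          rw [hwc]
          rcases PySem.List.foldl_max_mem t a with h | h
          · rw [h]; exact List.mem_cons_self
          · exact List.mem_cons_of_mem _ h
        have hmD : t.foldl max a ∈ d :: rest := hcov _ hmmem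
        have hmd : t.foldl max a = d := by
          rcases List.mem_cons.mp hmD with h | h
          · exact h
          · exact absurd hdle (not_le_of_gt (hd _ h))
        simp [pvOmax, hmd]
    · rw [if_neg hP]
      refine ih hrest (fun c hc => ?_)
      have hcd : c ∈ d :: rest := hcov c hc
      rcases List.mem_cons.mp hcd with h | h
      · subst h
        exact absurd ((PySem.Chars.isIn_iff_infix _ _).mpr ((pvMem_wc_iff c s).mp hc)) hP
      · exact h


-- ===== VERDICT (by name: the statement is the Claim_ definition above) =====
theorem largestGoodInteger_spec : Claim_equal_largestGoodInteger := by
  unfold Claim_equal_largestGoodInteger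
  intro num _
  unfold Spec_largestGoodInteger largestGoodInteger largestGoodInteger_alt
  have hlen : PySem.Str.len num = ((num.toList).length : Int) := by simp
  rw [hlen]
  have hD : (PySem.List.sorted (PySem.Set.ofList num.toList) (fun c => c) true).Pairwise
      (fun a b => b < a) := by
    have hle := PySem.List.sorted_pairwise_rev (xs := PySem.Set.ofList num.toList)
      (key := fun c => c) (κ := Char)
    have hnd : (PySem.List.sorted (PySem.Set.ofList num.toList) (fun c => c) true).Nodup :=
      (PySem.List.sorted_perm _ _ _).nodup_iff.mpr (PySem.Set.nodup_ofList _)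
    exact (hle.and hnd).imp (fun h => lt_of_le_of_ne h.1 h.2.symm)
  have hcov : ∀ c, c ∈ pvWc num.toList →
      c ∈ PySem.List.sorted (PySem.Set.ofList num.toList) (fun c => c) true := by
    intro c hc
    have hinf := (pvMem_wc_iff c num.toList).mp hc
    have hmem : c ∈ num.toList := hinf.mem (by simp)
    rw [PySem.List.mem_sorted, PySem.Set.mem_ofList]
    exact hmem
  rw [pvFindFirst_spec _ _ hD hcov,
      show (PySem.List.pyRange 2 ((num.toList.length : Int)) 1).foldl (pvAStep num.toList) none
          = pvOmax (pvWc num.toList) from pvMxA_eq_omax num.toList]
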